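-- pv_equiv track=rewrite | github.com/serrhiy/ads | semester2/lab3/src/matrix.py | to_indirected
-- ===== SOURCE A (Python) =====
-- def to_indirected(matrix):
--   length = len(matrix)
--   result = []
--   for i in range(length):
--     result.append([0] * length)
--     for j in range(i + 1):
--       value = matrix[i][j] | matrix[j][i]
--       result[i][j] = value
--       result[j][i] = value
--   return result
-- ===== SOURCE B (Python) =====
-- def to_indirected(matrix):
--   transposed = [list(col) for col in zip(*matrix)]
--   return [[a | b for a, b in zip(row, transposed[i])]
--           for i, row in enumerate(matrix)]
-- ===== Notes on version B (the rewrite author's own statement) =====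
-- stated objective: alternative
-- what changed: B computes the transpose once (zip(*matrix)) and builds the result in one uniform full-matrix pass OR-ing each cell with its transposed counterpart, instead of A's triangular index loop that pre-fills zero rows and writes each symmetric pair twice via double in-place assignment.
import Mathlib
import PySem

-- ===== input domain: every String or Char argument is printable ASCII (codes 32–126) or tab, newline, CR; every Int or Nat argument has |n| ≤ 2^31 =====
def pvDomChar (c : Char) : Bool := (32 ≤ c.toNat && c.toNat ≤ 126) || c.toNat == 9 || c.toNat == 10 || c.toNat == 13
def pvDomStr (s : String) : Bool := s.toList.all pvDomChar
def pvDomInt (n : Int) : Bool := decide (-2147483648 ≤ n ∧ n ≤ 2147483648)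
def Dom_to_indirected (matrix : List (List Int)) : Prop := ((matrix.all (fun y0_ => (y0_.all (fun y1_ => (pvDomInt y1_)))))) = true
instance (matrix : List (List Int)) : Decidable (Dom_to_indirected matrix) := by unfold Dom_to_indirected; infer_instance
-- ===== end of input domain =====

-- B differs from A only in decomposition: transpose once, then one uniform elementwise OR pass.

-- ===== PORT A =====
-- A: triangular loop, appends a zero row per i, then writes both (i,j) and (j,i) in place.
def to_indirected (matrix : List (List Int)) : List (List Int) :=
  let length := matrix.length
  (List.range length).foldl (fun result i =>
    let result := result ++ [List.replicate length (0 : Int)]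
    (List.range (i + 1)).foldl (fun result j =>
      let value := PySem.Int.bor ((matrix.getD i []).getD j 0) ((matrix.getD j []).getD i 0)
      let result := result.set i ((result.getD i []).set j value)
      result.set j ((result.getD j []).set i value)) result) []

-- ===== PORT B =====
-- zip(*matrix): transpose truncated to the shortest row, as Python's zip does.
def zipStar : List (List Int) → List (List Int)
  | [] => []
  | [r] => r.map (fun a => [a])
  | r :: s :: rest => ((r.zip (zipStar (s :: rest))).map (fun p => p.1 :: p.2))

def to_indirected_alt (matrix : List (List Int)) : List (List Int) :=
  let transposed := zipStar matrix
  (PySem.List.enumerate matrix 0).map (fun ir =>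
    (ir.2.zip (PySem.List.pyGetD transposed ir.1 [])).map (fun ab => PySem.Int.bor ab.1 ab.2))

-- ===== PRECONDITION & SPEC =====
-- Pre_ excludes exactly the inputs where A raises IndexError: a row shorter than the row count.
def Pre_to_indirected (matrix : List (List Int)) : Prop :=
  ∀ row ∈ matrix, matrix.length ≤ row.length
instance (matrix : List (List Int)) : Decidable (Pre_to_indirected matrix) := by
  unfold Pre_to_indirected; infer_instance

def pvWitness_to_indirected : List (List Int) := [[0, 1], [2, 3]]

def Spec_to_indirected (matrix : List (List Int)) (out : List (List Int)) : Prop := out = to_indirected_alt matrix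
instance (matrix : List (List Int)) (out : List (List Int)) : Decidable (Spec_to_indirected matrix out) := by unfold Spec_to_indirected; infer_instance

-- ===== CLAIM (what is proved, stated in full; the proofs are below) =====
def Claim_equal_to_indirected : Prop := ∀ (matrix : List (List Int)), Dom_to_indirected matrix → Pre_to_indirected matrix → Spec_to_indirected matrix (to_indirected matrix)

-- ===== LEMMAS AND PROOFS =====

-- the common value at cell (i, j)
def pvV (m : List (List Int)) (i j : Nat) : Int :=
  PySem.Int.bor ((m.getD i []).getD j 0) ((m.getD j []).getD i 0)

-- the full symmetric matrix both programs compute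
def pvFull (m : List (List Int)) : List (List Int) :=
  (List.range m.length).map (fun i => (List.range m.length).map (fun j => pvV m i j))

-- state after k outer iterations
def pvAmat (m : List (List Int)) (k : Nat) : List (List Int) :=
  (List.range k).map (fun i => (List.range m.length).map (fun j => if j < k then pvV m i j else 0))

-- state during outer iteration k, after t inner iterations
def pvImat (m : List (List Int)) (k t : Nat) : List (List Int) :=
  (List.range k).map (fun i => (List.range m.length).map (fun j =>
      if j < k then pvV m i j else if j = k ∧ i < t then pvV m i k else 0))
  ++ [(List.range m.length).map (fun j => if j < t then pvV m k j else 0)]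

theorem pvV_comm (m : List (List Int)) (i j : Nat) : pvV m i j = pvV m j i := by
  simp [pvV, PySem.Int.bor_comm]

theorem pvImat_zero (m : List (List Int)) (k : Nat) :
    pvImat m k 0 = pvAmat m k ++ [List.replicate m.length (0 : Int)] := by
  simp [pvImat, pvAmat]

-- the inner step
theorem pvImat_step (m : List (List Int)) (k t : Nat) (hk : k < m.length) (ht : t ≤ k) :
    ((pvImat m k t).set k (((pvImat m k t).getD k []).set t (pvV m k t))).set t
      ((((pvImat m k t).set k (((pvImat m k t).getD k []).set t (pvV m k t))).getD t []).set k (pvV m k t))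
      = pvImat m k (t + 1) := by
  have hgetk : (pvImat m k t).getD k [] =
      (List.range m.length).map (fun j => if j < t then pvV m k j else 0) := by
    simp only [pvImat]
    rw [List.getD_eq_getElem?_getD, List.getElem?_append_right (by simp)]
    simp
  have hset : ((List.range m.length).map (fun j => if j < t then pvV m k j else 0)).set t (pvV m k t)
      = (List.range m.length).map (fun j => if j < t + 1 then pvV m k j else 0) := by
    apply List.ext_getElem
    · simp
    intro j hj hj'
    simp only [List.getElem_set, List.getElem_map, List.getElem_range]
    by_cases hjt : t = j
    · simp [hjt, show j < j + 1 by omega]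
    · simp only [if_neg hjt]
      by_cases h2 : j < t
      · simp [h2, show j < t + 1 by omega]
      · simp [h2, show ¬ j < t + 1 by omega]
  rw [hgetk, hset]
  have hlen : (pvImat m k t).length = k + 1 := by simp [pvImat]
  have hs1 : (pvImat m k t).set k ((List.range m.length).map (fun j => if j < t + 1 then pvV m k j else 0))
      = ((List.range k).map (fun i => (List.range m.length).map (fun j =>
          if j < k then pvV m i j else if j = k ∧ i < t then pvV m i k else 0)))
        ++ [(List.range m.length).map (fun j => if j < t + 1 then pvV m k j else 0)] := by
    apply List.ext_getElem
    · simp [pvImat]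
    intro a ha ha'
    simp only [List.getElem_set]
    by_cases hak : k = a
    · subst hak
      rw [List.getElem_append_right (by simp)]
      simp
    · simp only [if_neg hak]
      simp only [pvImat]
      rw [List.getElem_append_left (by simp at ha ⊢; omega),
          List.getElem_append_left (by simp at ha' ⊢; omega)]
  rw [hs1]
  set Apart := (List.range k).map (fun i => (List.range m.length).map (fun j =>
      if j < k then pvV m i j else if j = k ∧ i < t then pvV m i k else 0)) with hApart
  have hApartLen : Apart.length = k := by simp [hApart]
  by_cases htk : t = k
  · -- second write hits the appended row again
    subst htk
    have hgd : (Apart ++ [(List.range m.length).map (fun j => if j < t + 1 then pvV m t j else 0)]).getD t []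
        = (List.range m.length).map (fun j => if j < t + 1 then pvV m t j else 0) := by
      rw [List.getD_eq_getElem?_getD, List.getElem?_append_right (by omega)]
      simp [hApartLen]
    rw [hgd]
    have hrow : ((List.range m.length).map (fun j => if j < t + 1 then pvV m t j else 0)).set t (pvV m t t)
        = (List.range m.length).map (fun j => if j < t + 1 then pvV m t j else 0) := by
      apply List.ext_getElem
      · simp
      intro j hj hj'
      simp only [List.getElem_set, List.getElem_map, List.getElem_range]
      by_cases hjt : t = j
      · simp [hjt, show j < j + 1 by omega]
      · simp [hjt]
    rw [hrow]
    apply List.ext_getElem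
    · simp [pvImat, hApartLen]
    intro a ha ha'
    by_cases hat : a < t
    · rw [List.getElem_set_ne (by omega), List.getElem_append_left (by omega)]
      simp only [pvImat]
      rw [List.getElem_append_left (by simp; omega)]
      simp only [hApart, List.getElem_map, List.getElem_range]
      apply List.map_congr_left; intro j hj
      by_cases h1 : j < t
      · simp [h1]
      · by_cases h2 : j = t
        · simp [h2, hat, show a < t + 1 by omega]
        · simp [h1, h2]
    · have hat' : a = t := by simp [hApartLen] at ha; omega
      subst hat'
      rw [List.getElem_set_self (by simp [hApartLen])]
      simp only [pvImat]
      rw [List.getElem_append_right (by simp)]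
      simp
  · -- t < k: second write hits row t of the map part
    have htk' : t < k := by omega
    have hgd : (Apart ++ [(List.range m.length).map (fun j => if j < t + 1 then pvV m k j else 0)]).getD t []
        = (List.range m.length).map (fun j =>
            if j < k then pvV m t j else if j = k ∧ t < t then pvV m t k else 0) := by
      rw [List.getD_eq_getElem?_getD, List.getElem?_append_left (by omega),
          List.getElem?_eq_getElem (by omega)]
      simp [hApart]
    rw [hgd]
    apply List.ext_getElem
    · simp [pvImat, hApartLen]
    intro a ha ha'
    have han : a < k + 1 := by simp [hApartLen] at ha; omega
    by_cases hat : a = t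
    · subst hat
      rw [List.getElem_set_self (by simp [hApartLen]; omega)]
      simp only [pvImat]
      rw [List.getElem_append_left (by simp; omega)]
      simp only [List.getElem_map, List.getElem_range]
      apply List.ext_getElem
      · simp
      intro j hj hj'
      simp only [List.getElem_set, List.getElem_map, List.getElem_range]
      by_cases h1 : k = j
      · subst h1
        simp [show a < a + 1 by omega, pvV_comm m k a]
      · simp only [if_neg h1]
        by_cases h2 : j < k
        · simp [h2]
        · have h3 : ¬ j = k := fun h => h1 h.symm
          simp [h2, h3]
    · rw [List.getElem_set_ne (by omega)]
      by_cases hak : a < k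
      · rw [List.getElem_append_left (by omega)]
        simp only [pvImat]
        rw [List.getElem_append_left (by simp; omega)]
        simp only [hApart, List.getElem_map, List.getElem_range]
        apply List.map_congr_left; intro j hj
        by_cases h1 : j < k
        · simp [h1]
        · by_cases h2 : j = k
          · have h3 : (a < t) ↔ (a < t + 1) := by omega
            simp [h2, h3]
          · simp [h1, h2]
      · have hak' : a = k := by omega
        subst hak'
        rw [List.getElem_append_right (by omega)]
        simp only [pvImat]
        rw [List.getElem_append_right (by simp)]
        simp [hApartLen]

theorem pvInner (m : List (List Int)) (k : Nat) (hk : k < m.length) :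
    ∀ t, t ≤ k + 1 →
      (List.range t).foldl (fun result j =>
        let value := PySem.Int.bor ((m.getD k []).getD j 0) ((m.getD j []).getD k 0)
        let result := result.set k ((result.getD k []).set j value)
        result.set j ((result.getD j []).set k value))
        (pvAmat m k ++ [List.replicate m.length (0 : Int)]) = pvImat m k t := by
  intro t ht
  induction t with
  | zero => simpa using (pvImat_zero m k).symm
  | succ t ih =>
    rw [List.range_succ, List.foldl_append, ih (by omega)]
    simpa using pvImat_step m k t hk (by omega)

theorem pvImat_last (m : List (List Int)) (k : Nat) :
    pvImat m k (k + 1) = pvAmat m (k + 1) := by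
  simp only [pvImat, pvAmat, List.range_succ, List.map_append, List.map_cons, List.map_nil]
  congr 1
  · apply List.map_congr_left; intro i hi
    apply List.map_congr_left; intro j hj
    simp only [List.mem_range] at hi hj
    by_cases h1 : j < k
    · have h2 : j < k + 1 := by omega
      simp [h1, h2]
    · by_cases h2 : j = k
      · have h4 : j < k + 1 := by omega
        have h5 : i < k + 1 := by omega
        simp [h2, h5]
      · have h3 : ¬ j < k + 1 := by omega
        simp [h1, h2, h3]

theorem pvA_eq_full (m : List (List Int)) : to_indirected m = pvFull m := by
  have main : ∀ K, K ≤ m.length →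
      (List.range K).foldl (fun result i =>
        let result := result ++ [List.replicate m.length (0 : Int)]
        (List.range (i + 1)).foldl (fun result j =>
          let value := PySem.Int.bor ((m.getD i []).getD j 0) ((m.getD j []).getD i 0)
          let result := result.set i ((result.getD i []).set j value)
          result.set j ((result.getD j []).set i value)) result) [] = pvAmat m K := by
    intro K hK
    induction K with
    | zero => simp [pvAmat]
    | succ k ih =>
      rw [List.range_succ, List.foldl_append, ih (by omega)]
      simp only [List.foldl_cons, List.foldl_nil]
      rw [pvInner m k (by omega) (k + 1) (by omega)]
      exact pvImat_last m k
  have := main m.length (le_refl _)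
  simp only [to_indirected]
  rw [this]
  simp only [pvAmat, pvFull]
  apply List.map_congr_left; intro i hi
  apply List.map_congr_left; intro j hj
  simp only [List.mem_range] at hj
  simp [hj]

theorem zipStar_length (m : List (List Int)) (n : Nat) (hm : m ≠ [])
    (h : ∀ r ∈ m, n ≤ r.length) : n ≤ (zipStar m).length := by
  induction m with
  | nil => simp at hm
  | cons r rest ih =>
    cases rest with
    | nil => simpa [zipStar] using h r (by simp)
    | cons s rest' =>
      have h1 : n ≤ r.length := h r (by simp)
      have h2 := ih (by simp) (fun x hx => h x (by simp [hx]))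
      simp [zipStar]; omega

theorem zipStar_getElem (m : List (List Int)) (n k : Nat) (hm : m ≠ [])
    (h : ∀ r ∈ m, n ≤ r.length) (hk : k < n) (hlt : k < (zipStar m).length) :
    (zipStar m)[k] = m.map (fun r => r.getD k 0) := by
  induction m with
  | nil => simp at hm
  | cons r rest ih =>
    cases rest with
    | nil =>
      have h1 : n ≤ r.length := h r (by simp)
      simp [zipStar] at hlt ⊢
      rw [List.getElem?_eq_getElem (by omega)]; rfl
    | cons s rest' =>
      have h1 : n ≤ r.length := h r (by simp)
      have hlt' : k < (zipStar (s :: rest')).length := by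
        have := zipStar_length (s :: rest') n (by simp) (fun x hx => h x (by simp [hx])); omega
      have ihx := ih (by simp) (fun x hx => h x (by simp [hx]))
      simp [zipStar] at hlt ⊢
      refine ⟨by rw [List.getElem?_eq_getElem (by omega)]; rfl, ?_⟩
      have := ihx hlt.2
      simp [List.getD_eq_getElem?_getD] at this
      exact this

theorem pvB_eq_full (m : List (List Int)) (h : Pre_to_indirected m) :
    to_indirected_alt m = pvFull m := by
  rcases eq_or_ne m [] with rfl | hm
  · rfl
  have hzl : m.length ≤ (zipStar m).length := zipStar_length m m.length hm h
  apply List.ext_getElem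
  · simp [to_indirected_alt, pvFull]
  intro i hi hi'
  have him : i < m.length := by simpa [pvFull] using hi'
  have hrow : m.length ≤ m[i].length := h _ (List.getElem_mem him)
  simp only [to_indirected_alt, pvFull, List.getElem_map,
    PySem.List.getElem_enumerate, List.getElem_range]
  have hidx : PySem.List.pyGetD (zipStar m) ((0 : Int) + (i : Nat)) []
      = (zipStar m)[i]'(by omega) := by
    rw [zero_add, PySem.List.pyGetD_natCast, List.getD_eq_getElem?_getD,
        List.getElem?_eq_getElem (show i < (zipStar m).length by omega)]
    rfl
  rw [hidx, zipStar_getElem m m.length i hm h him (by omega)]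
  apply List.ext_getElem
  · simp; omega
  intro j hj hj'
  have hjm : j < m.length := by simpa using hj'
  have hrj : m.length ≤ m[j].length := h _ (List.getElem_mem hjm)
  simp only [List.getElem_map, List.getElem_zip, List.getElem_range, pvV]
  have e1 : m.getD i [] = m[i] := by
    rw [List.getD_eq_getElem?_getD, List.getElem?_eq_getElem him]; rfl
  have e2 : m.getD j [] = m[j] := by
    rw [List.getD_eq_getElem?_getD, List.getElem?_eq_getElem hjm]; rfl
  have e3 : m[i].getD j 0 = m[i][j] := by
    rw [List.getD_eq_getElem?_getD, List.getElem?_eq_getElem (by omega : j < m[i].length)]; rfl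
  rw [e1, e2, e3]

-- ===== VERDICT (by name: the statement is the Claim_ definition above) =====
theorem to_indirected_spec : Claim_equal_to_indirected := by
  intro m _ hpre
  unfold Spec_to_indirected
  rw [pvA_eq_full, pvB_eq_full m hpre]
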